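-- pv_equiv track=rewrite | github.com/myfunc/irun | apps/ivan/src/ivan/replays/telemetry.py | _compute_ground_flicker
-- ===== SOURCE A (Python) =====
-- def _compute_ground_flicker(grounded: list[bool]) -> int:
--     if len(grounded) <= 1:
--         return 0
--     flips = 0
--     prev = bool(grounded[0])
--     for cur in grounded[1:]:
--         if bool(cur) != prev:
--             flips += 1
--         prev = bool(cur)
--     return int(flips)
-- ===== SOURCE B (Python) =====
-- def _compute_ground_flicker(grounded: list[bool]) -> int:
--     # Pack the samples into one integer bitmask, first sample at the least
--     # significant bit (base-2 parse of the reversed bit string); XOR with the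
--     # mask shifted right by one sets a bit at every adjacent transition (plus
--     # one leftover top bit for the final sample), so popcount gives the flip
--     # count after removing that bit.
--     bits = ''.join('1' if v else '0' for v in reversed(grounded))
--     n = int('0' + bits, 2)
--     last = 1 if grounded and grounded[-1] else 0
--     return (n ^ (n >> 1)).bit_count() - last
-- ===== Notes on version B (the rewrite author's own statement) =====
-- stated objective: alternative
-- what changed: B packs the samples into a single integer bitmask (first sample at the LSB, built by a base-2 parse of the bit string) and computes the flip count as popcount(n XOR (n >> 1)) minus the leftover top bit for the last sample, instead of A's explicit previous-vs-current scan with a flips counter.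
import Mathlib
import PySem

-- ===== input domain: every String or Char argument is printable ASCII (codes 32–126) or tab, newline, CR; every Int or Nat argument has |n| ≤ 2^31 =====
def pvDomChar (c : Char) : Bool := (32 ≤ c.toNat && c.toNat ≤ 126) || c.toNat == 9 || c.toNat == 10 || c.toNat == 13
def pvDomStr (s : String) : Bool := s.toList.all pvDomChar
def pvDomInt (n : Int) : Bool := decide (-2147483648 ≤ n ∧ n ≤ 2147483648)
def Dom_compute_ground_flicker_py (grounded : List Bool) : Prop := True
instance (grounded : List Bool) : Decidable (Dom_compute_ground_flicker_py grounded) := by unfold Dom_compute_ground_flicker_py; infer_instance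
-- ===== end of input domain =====

-- B replaces A's prev/flips scan by a different representation: pack the samples
-- into an integer bitmask and return popcount(n XOR (n >> 1)) minus the top
-- leftover bit (alternative algorithm, same O(n) cost).


-- ===== PORT A =====
def compute_ground_flicker_py (grounded : List Bool) : Int :=
  if grounded.length ≤ 1 then 0
  else
    match grounded with
    | [] => 0  -- unreachable: length > 1
    | p :: rest =>
      -- flips = 0; prev = grounded[0]; for cur in grounded[1:]: …
      let st := rest.foldl
        (fun (s : Int × Bool) cur => (if cur ≠ s.2 then s.1 + 1 else s.1, cur))
        (0, p)
      st.1

-- ===== PORT B =====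
/-- `int.bit_count` of Source B: popcount by repeated halving. -/
def pvPopcount (n : Nat) : Nat :=
  if h : n = 0 then 0 else n % 2 + pvPopcount (n / 2)
decreasing_by exact Nat.div_lt_self (Nat.pos_of_ne_zero h) one_lt_two

def compute_ground_flicker_py_alt (grounded : List Bool) : Int :=
  -- bits = ''.join('1' if v else '0' for v in reversed(grounded)); n = int('0' + bits, 2)
  -- int(s, 2) is ported by hand as a base-2 fold over the chars (exact: s is '0'/'1' chars only)
  let bits : List Char := grounded.reverse.map (fun v => if v then '1' else '0')
  let n : Nat := ('0' :: bits).foldl (fun a c => a * 2 + (if c = '1' then 1 else 0)) 0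
  -- last = 1 if grounded and grounded[-1] else 0
  let last : Nat := match grounded.getLast? with
    | some b => if b then 1 else 0
    | none => 0
  -- (n ^ (n >> 1)).bit_count() - last
  (pvPopcount (n ^^^ (n >>> 1)) : Int) - (last : Int)

-- ===== PRECONDITION & SPEC =====
def Spec_compute_ground_flicker_py (grounded : List Bool) (out : Int) : Prop := out = compute_ground_flicker_py_alt grounded
instance (grounded : List Bool) (out : Int) : Decidable (Spec_compute_ground_flicker_py grounded out) := by unfold Spec_compute_ground_flicker_py; infer_instance

-- ===== CLAIM (what is proved, stated in full; the proofs are below) =====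
def Claim_equal_compute_ground_flicker_py : Prop := ∀ (grounded : List Bool), Dom_compute_ground_flicker_py grounded → Spec_compute_ground_flicker_py grounded (compute_ground_flicker_py grounded)

-- ===== LEMMAS AND PROOFS =====

/-- Number of adjacent changes in `rest` relative to a previous value `p`. -/
def pvChanges (p : Bool) : List Bool → Nat
  | [] => 0
  | c :: cs => (if c ≠ p then 1 else 0) + pvChanges c cs

/-- Last element of `v :: xs`. -/
def pvLastB (v : Bool) : List Bool → Bool
  | [] => v
  | w :: t => pvLastB w t

/-- LSB-first bitmask of a boolean list. -/
def pvEncode : List Bool → Nat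
  | [] => 0
  | v :: t => (if v then 1 else 0) + 2 * pvEncode t

theorem foldl_flips (rest : List Bool) : ∀ (p : Bool) (acc : Int),
    (rest.foldl (fun (s : Int × Bool) cur => (if cur ≠ s.2 then s.1 + 1 else s.1, cur)) (acc, p)).1
      = acc + (pvChanges p rest : Int) := by
  induction rest with
  | nil => intro p acc; simp [pvChanges]
  | cons c cs ih =>
    intro p acc
    simp only [List.foldl_cons, pvChanges]
    by_cases h : c = p
    · rw [if_neg (by simp [h]), ih, if_neg (by simp [h])]
      push_cast; ring
    · rw [if_pos h, ih, if_pos h]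
      push_cast; ring

theorem pvPopcount_bit (b n : Nat) (hb : b ≤ 1) :
    pvPopcount (b + 2 * n) = b + pvPopcount n := by
  rw [pvPopcount]
  by_cases h : b + 2 * n = 0
  · have hb0 : b = 0 := by omega
    have hn0 : n = 0 := by omega
    simp [h, hb0, hn0, pvPopcount]
  · rw [dif_neg h]
    have h1 : (b + 2 * n) % 2 = b := by omega
    have h2 : (b + 2 * n) / 2 = n := by omega
    rw [h1, h2]

theorem pvXor_bit (v w : Bool) (a b : Nat) :
    (((if v then 1 else 0) + 2 * a) ^^^ ((if w then 1 else 0) + 2 * b))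
      = (if v ≠ w then 1 else 0) + 2 * (a ^^^ b) := by
  have hv : ((if v then 1 else 0) + 2 * a) = Nat.bit v a := by
    cases v <;> simp [Nat.bit] <;> omega
  have hw : ((if w then 1 else 0) + 2 * b) = Nat.bit w b := by
    cases w <;> simp [Nat.bit] <;> omega
  have hx : ((if v ≠ w then 1 else 0) + 2 * (a ^^^ b)) = Nat.bit (v != w) (a ^^^ b) := by
    cases v <;> cases w <;> simp [Nat.bit] <;> omega
  rw [hv, hw, hx]
  exact Nat.xor_bit v a w b

theorem pvEncode_div2 (v : Bool) (t : List Bool) :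
    pvEncode (v :: t) / 2 = pvEncode t := by
  simp only [pvEncode]
  cases v <;> simp <;> omega

theorem pc_xor (xs : List Bool) : ∀ v : Bool,
    pvPopcount (pvEncode (v :: xs) ^^^ pvEncode xs)
      = pvChanges v xs + (if pvLastB v xs then 1 else 0) := by
  induction xs with
  | nil =>
    intro v
    cases v <;> simp [pvEncode, pvChanges, pvLastB, pvPopcount]
  | cons w t ih =>
    intro v
    have : pvEncode (v :: w :: t) ^^^ pvEncode (w :: t)
        = (if v ≠ w then 1 else 0) + 2 * (pvEncode (w :: t) ^^^ pvEncode t) := by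
      calc pvEncode (v :: w :: t) ^^^ pvEncode (w :: t)
          = ((if v then 1 else 0) + 2 * pvEncode (w :: t))
              ^^^ ((if w then 1 else 0) + 2 * pvEncode t) := by rfl
        _ = (if v ≠ w then 1 else 0) + 2 * (pvEncode (w :: t) ^^^ pvEncode t) :=
            pvXor_bit ..
    rw [this, pvPopcount_bit _ _ (by split <;> omega), ih w]
    simp only [pvChanges, pvLastB]
    have h1 : (if w ≠ v then (1:Nat) else 0) = (if v ≠ w then 1 else 0) := by
      cases v <;> cases w <;> rfl
    rw [h1, Nat.add_assoc]
    rfl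

theorem foldl_encode (xs : List Bool) :
    ('0' :: xs.reverse.map (fun v => if v then '1' else '0')).foldl
        (fun a c => a * 2 + (if c = '1' then 1 else 0)) 0 = pvEncode xs := by
  rw [List.foldl_cons, List.foldl_map]
  have hf : (fun (a : Nat) (v : Bool) => a * 2 + (if (if v then '1' else '0') = '1' then 1 else 0))
      = fun a v => a * 2 + (if v then 1 else 0) := by
    funext a v; cases v <;> simp
  rw [hf, if_neg (by decide), List.foldl_reverse]
  induction xs with
  | nil => rfl
  | cons v t ih => simp only [List.foldr_cons, ih, pvEncode]; omega

theorem getLast?_eq_lastB (v : Bool) (xs : List Bool) :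
    (v :: xs).getLast? = some (pvLastB v xs) := by
  induction xs generalizing v with
  | nil => rfl
  | cons w t ih => rw [List.getLast?_cons_cons, ih, pvLastB]

theorem alt_eq_changes (v : Bool) (xs : List Bool) :
    compute_ground_flicker_py_alt (v :: xs) = (pvChanges v xs : Int) := by
  simp only [compute_ground_flicker_py_alt, foldl_encode, getLast?_eq_lastB]
  have hs : pvEncode (v :: xs) >>> 1 = pvEncode xs := by
    rw [Nat.shiftRight_one, pvEncode_div2]
  rw [hs, pc_xor xs v]
  split <;> push_cast <;> ring

-- ===== VERDICT (by name: the statement is the Claim_ definition above) =====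
theorem compute_ground_flicker_py_spec : Claim_equal_compute_ground_flicker_py := by
  intro grounded _
  unfold Spec_compute_ground_flicker_py compute_ground_flicker_py
  match grounded with
  | [] => simp [compute_ground_flicker_py_alt, pvPopcount]
  | [p] =>
    cases p <;> simp [compute_ground_flicker_py_alt, pvPopcount]
  | p :: c :: cs =>
    rw [alt_eq_changes, if_neg (by simp)]
    simpa using foldl_flips (c :: cs) p 0
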